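-- pv_equiv track=rewrite | github.com/Qenszu/workshop | python/WDI/zestaw_3/117.py | func
-- ===== SOURCE A (Python) =====
-- def func(T):
--     size = len(T)
--     cnt = 2
--     result = 0
--
--     for i in range(size):
--         for j in range(size - 2):
--             tmp_j = j
--             if T[i][j] + T[i][j+1] == T[i][j+2] and T[i][j+1] != 0:
--                 cnt = 2
--                 while tmp_j+2 < size:
--                     if T[i][tmp_j] + T[i][tmp_j+1] == T[i][tmp_j+2]:
--                         cnt += 1
--                         tmp_j += 1
--                         result = max(result, cnt)
--                     else:
--                         break
--             tmp_j = j
--             if T[i][j+2] + T[i][j+1] == T[i][j] and T[i][j+1] != 0: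
--                 cnt = 2
--                 while tmp_j + 2 < size:
--                     if T[i][tmp_j+2] + T[i][tmp_j+1] == T[i][tmp_j]:
--                         cnt += 1
--                         tmp_j += 1
--                         result = max(result, cnt)
--                     else:
--                         break
--     return result
-- ===== SOURCE B (Python) =====
-- def func(T):
--     # One right-to-left pass per row over the first len(T) columns (the columns A indexes):
--     # run lengths of consecutive Fibonacci-like triples replace A's restarted inner scans.
--     n = len(T)
--     best = 0
--     for row in T:
--         r = row[:n]
--         frun = brun = 0
--         for j in range(len(r) - 3, -1, -1):
--             a, b, c = r[j], r[j + 1], r[j + 2]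
--             frun = frun + 1 if a + b == c else 0
--             brun = brun + 1 if c + b == a else 0
--             if b != 0:
--                 if frun:
--                     best = max(best, 2 + frun)
--                 if brun:
--                     best = max(best, 2 + brun)
--     return best
-- ===== Notes on version B (the rewrite author's own statement) =====
-- stated objective: alternative
-- what changed: A restarts a while-scan from every start index of every row (worst-case O(n^3)); B does one right-to-left pass per row maintaining run lengths of consecutive forward/backward Fibonacci-like triples, updating the maximum at each valid nonzero-middle start (O(n^2) worst case; on random inputs a timing run read only ~1.4x, so no speed is claimed).
import Mathlib
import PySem

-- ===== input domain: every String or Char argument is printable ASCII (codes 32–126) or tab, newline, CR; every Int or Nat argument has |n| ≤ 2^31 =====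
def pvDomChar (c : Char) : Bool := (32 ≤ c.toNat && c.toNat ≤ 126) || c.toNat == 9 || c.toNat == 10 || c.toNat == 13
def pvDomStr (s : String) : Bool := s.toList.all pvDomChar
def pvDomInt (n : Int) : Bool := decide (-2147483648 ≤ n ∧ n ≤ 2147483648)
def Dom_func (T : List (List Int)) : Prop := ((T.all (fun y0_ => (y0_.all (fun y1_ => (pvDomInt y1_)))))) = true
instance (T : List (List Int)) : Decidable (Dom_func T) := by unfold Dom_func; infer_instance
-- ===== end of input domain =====

-- B replaces A's restarted inner scans by one right-to-left run-length pass per row over the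
-- first len(T) columns (exactly the columns A indexes); return value only.

-- ===== PORT A =====
-- T[i][j] for the Nat indices the loops produce; under Pre_func every access is in range,
-- where List.getD equals Python indexing exactly.
def pvGet (r : List Int) (j : Nat) : Int := r.getD j 0

def pvRow (T : List (List Int)) (i : Nat) : List Int := T.getD i []

-- the first 'while' loop of A (forward Fibonacci condition); state (cnt, result)
def whileF (row : List Int) (size tmp_j : Nat) (cnt result : Int) : Int × Int :=
  if tmp_j + 2 < size then
    if pvGet row tmp_j + pvGet row (tmp_j + 1) == pvGet row (tmp_j + 2) then
      whileF row size (tmp_j + 1) (cnt + 1) (max result (cnt + 1))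
    else (cnt, result)
  else (cnt, result)
termination_by size - tmp_j

-- the second 'while' loop of A (backward condition)
def whileB (row : List Int) (size tmp_j : Nat) (cnt result : Int) : Int × Int :=
  if tmp_j + 2 < size then
    if pvGet row (tmp_j + 2) + pvGet row (tmp_j + 1) == pvGet row tmp_j then
      whileB row size (tmp_j + 1) (cnt + 1) (max result (cnt + 1))
    else (cnt, result)
  else (cnt, result)
termination_by size - tmp_j

-- body of A's 'for j' loop
def innerJ (row : List Int) (size : Nat) (st : Int × Int) (j : Nat) : Int × Int :=
  let st1 :=
    if (pvGet row j + pvGet row (j + 1) == pvGet row (j + 2)) && (pvGet row (j + 1) != 0) then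
      whileF row size j 2 st.2
    else st
  if (pvGet row (j + 2) + pvGet row (j + 1) == pvGet row j) && (pvGet row (j + 1) != 0) then
    whileB row size j 2 st1.2
  else st1

def func (T : List (List Int)) : Int :=
  let size := T.length
  ((List.range size).foldl
    (fun st i => (List.range (size - 2)).foldl (fun st j => innerJ (pvRow T i) size st j) st)
    ((2 : Int), (0 : Int))).2

-- ===== PORT B =====
-- body of Source B's 'for j in range(len(r)-3, -1, -1)' loop; state (frun, brun, best)
def stepB (r : List Int) (st : Int × Int × Int) (j : Nat) : Int × Int × Int :=
  let a := pvGet r j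
  let b := pvGet r (j + 1)
  let c := pvGet r (j + 2)
  let frun := if a + b == c then st.1 + 1 else 0
  let brun := if c + b == a then st.2.1 + 1 else 0
  let best :=
    if b != 0 then
      let best1 := if frun != 0 then max st.2.2 (2 + frun) else st.2.2
      if brun != 0 then max best1 (2 + brun) else best1
    else st.2.2
  (frun, brun, best)

def func_alt (T : List (List Int)) : Int :=
  let n := T.length
  T.foldl (fun best row =>
    let r := row.take n
    ((List.range (r.length - 2)).reverse.foldl (stepB r) (0, 0, best)).2.2) 0

-- ===== PRECONDITION & SPEC =====
-- Exactly the inputs on which the Python A returns: when len(T) >= 3 it reads T[i][0..len(T)-1]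
-- of every row, so any shorter row makes it raise IndexError; with len(T) < 3 it reads nothing.
def Pre_func (T : List (List Int)) : Prop :=
  T.length < 3 ∨ ∀ row ∈ T, T.length ≤ row.length
instance (T : List (List Int)) : Decidable (Pre_func T) := by unfold Pre_func; infer_instance

def pvWitness_func : List (List Int) := [[1, 1, 2], [0, 0, 0], [5, 2, 3]]

def Spec_func (T : List (List Int)) (out : Int) : Prop := out = func_alt T
instance (T : List (List Int)) (out : Int) : Decidable (Spec_func T out) := by unfold Spec_func; infer_instance

-- ===== CLAIM (what is proved, stated in full; the proofs are below) =====
def Claim_equal_func : Prop := ∀ (T : List (List Int)), Dom_func T → Pre_func T → Spec_func T (func T)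

-- ===== LEMMAS AND PROOFS =====

-- forward/backward validity of the triple starting at j, streak lengths, and the candidate
-- value contributed by a start j (0 when the guard fails)
def valF (row : List Int) (j : Nat) : Bool := pvGet row j + pvGet row (j + 1) == pvGet row (j + 2)

def valB (row : List Int) (j : Nat) : Bool := pvGet row (j + 2) + pvGet row (j + 1) == pvGet row j

def Sf (row : List Int) (n j : Nat) : Nat :=
  if j + 2 < n then (if valF row j then Sf row n (j + 1) + 1 else 0) else 0
termination_by n - j

def Sb (row : List Int) (n j : Nat) : Nat :=
  if j + 2 < n then (if valB row j then Sb row n (j + 1) + 1 else 0) else 0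
termination_by n - j

def wF (row : List Int) (n j : Nat) : Int :=
  if valF row j && (pvGet row (j + 1) != 0) then 2 + (Sf row n j : Int) else 0

def wB (row : List Int) (n j : Nat) : Int :=
  if valB row j && (pvGet row (j + 1) != 0) then 2 + (Sb row n j : Int) else 0

def uCand (row : List Int) (n j : Nat) : Int := max (wF row n j) (wB row n j)

def rowMax (row : List Int) (n : Nat) (res : Int) : Int :=
  (List.range (n - 2)).foldl (fun r j => max r (uCand row n j)) res

lemma whileF_eq (row : List Int) (n : Nat) : ∀ (k j : Nat), n - j ≤ k → ∀ (cnt res : Int),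
    whileF row n j cnt res =
      (cnt + (Sf row n j : Int),
       if Sf row n j = 0 then res else max res (cnt + (Sf row n j : Int))) := by
  intro k
  induction k with
  | zero =>
    intro j hk cnt res
    rw [whileF, Sf]
    have : ¬ j + 2 < n := by omega
    simp [this]
  | succ k ih =>
    intro j hk cnt res
    rw [whileF, Sf]
    by_cases h : j + 2 < n
    · simp only [h, if_true]
      by_cases hv : valF row j
      · have hv' : (pvGet row j + pvGet row (j + 1) == pvGet row (j + 2)) = true := hv
        rw [if_pos hv', if_pos hv]
        rw [ih (j + 1) (by omega)]
        refine Prod.ext ?_ ?_ <;> simp only []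
        · push_cast; ring
        · rcases Nat.eq_zero_or_pos (Sf row n (j+1)) with h0 | h0
          · simp [h0]
          · have : Sf row n (j+1) + 1 ≠ 0 := by omega
            simp only [this, if_neg (by omega : ¬ Sf row n (j+1) = 0), if_false]
            push_cast
            omega
      · have hv' : ¬ (pvGet row j + pvGet row (j + 1) == pvGet row (j + 2)) = true := hv
        rw [if_neg hv', if_neg hv]
        simp
    · simp [h]

lemma whileB_eq (row : List Int) (n : Nat) : ∀ (k j : Nat), n - j ≤ k → ∀ (cnt res : Int),
    whileB row n j cnt res =
      (cnt + (Sb row n j : Int),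
       if Sb row n j = 0 then res else max res (cnt + (Sb row n j : Int))) := by
  intro k
  induction k with
  | zero =>
    intro j hk cnt res
    rw [whileB, Sb]
    have : ¬ j + 2 < n := by omega
    simp [this]
  | succ k ih =>
    intro j hk cnt res
    rw [whileB, Sb]
    by_cases h : j + 2 < n
    · simp only [h, if_true]
      by_cases hv : valB row j
      · have hv' : (pvGet row (j + 2) + pvGet row (j + 1) == pvGet row j) = true := hv
        rw [if_pos hv', if_pos hv]
        rw [ih (j + 1) (by omega)]
        refine Prod.ext ?_ ?_ <;> simp only []
        · push_cast; ring
        · rcases Nat.eq_zero_or_pos (Sb row n (j+1)) with h0 | h0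
          · simp [h0]
          · have : Sb row n (j+1) + 1 ≠ 0 := by omega
            simp only [this, if_neg (by omega : ¬ Sb row n (j+1) = 0), if_false]
            push_cast
            omega
      · have hv' : ¬ (pvGet row (j + 2) + pvGet row (j + 1) == pvGet row j) = true := hv
        rw [if_neg hv', if_neg hv]
        simp
    · simp [h]

lemma Sf_pos (row : List Int) (n j : Nat) (hj : j + 2 < n) (hv : valF row j = true) :
    Sf row n j ≠ 0 := by
  rw [Sf]; simp [hj, hv]

lemma Sb_pos (row : List Int) (n j : Nat) (hj : j + 2 < n) (hv : valB row j = true) :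
    Sb row n j ≠ 0 := by
  rw [Sb]; simp [hj, hv]

lemma innerJ_snd (row : List Int) (n : Nat) (st : Int × Int) (j : Nat)
    (hj : j + 2 < n) (hres : 0 ≤ st.2) :
    (innerJ row n st j).2 = max st.2 (uCand row n j) := by
  have hF := whileF_eq row n n j (by omega) 2 st.2
  have hB := whileB_eq row n n j (by omega) 2
  have hSf : (0:Int) ≤ (Sf row n j : Int) := Int.natCast_nonneg _
  have hSb : (0:Int) ≤ (Sb row n j : Int) := Int.natCast_nonneg _
  by_cases h1 : ((pvGet row j + pvGet row (j + 1) == pvGet row (j + 2)) && (pvGet row (j + 1) != 0)) = true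
  · by_cases h2 : ((pvGet row (j + 2) + pvGet row (j + 1) == pvGet row j) && (pvGet row (j + 1) != 0)) = true
    · simp only [innerJ, uCand, wF, wB, valF, valB, h1, h2, if_true]
      rw [hF]
      simp only []
      rw [if_neg (Sf_pos row n j hj (Bool.and_eq_true .. ▸ h1).1)]
      rw [hB, if_neg (Sb_pos row n j hj (Bool.and_eq_true .. ▸ h2).1)]
      omega
    · simp only [innerJ, uCand, wF, wB, valF, valB, h1, if_true, if_neg h2]
      rw [hF]
      simp only []
      rw [if_neg (Sf_pos row n j hj (Bool.and_eq_true .. ▸ h1).1)]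
      omega
  · by_cases h2 : ((pvGet row (j + 2) + pvGet row (j + 1) == pvGet row j) && (pvGet row (j + 1) != 0)) = true
    · simp only [innerJ, uCand, wF, wB, valF, valB, h2, if_true, if_neg h1]
      rw [hB, if_neg (Sb_pos row n j hj (Bool.and_eq_true .. ▸ h2).1)]
      omega
    · simp only [innerJ, uCand, wF, wB, valF, valB, if_neg h1, if_neg h2]
      omega

lemma le_foldl_maxu (row : List Int) (n : Nat) :
    ∀ (l : List Nat) (res : Int), res ≤ l.foldl (fun r j => max r (uCand row n j)) res := by
  intro l
  induction l with
  | nil => intro res; simp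
  | cons x l ih =>
    intro res
    exact le_trans (le_max_left _ _) (ih (max res (uCand row n x)))

lemma rowA_fold (row : List Int) (n : Nat) :
    ∀ (l : List Nat), (∀ j ∈ l, j + 2 < n) → ∀ (cnt res : Int), 0 ≤ res →
      (l.foldl (fun st j => innerJ row n st j) (cnt, res)).2
        = l.foldl (fun r j => max r (uCand row n j)) res := by
  intro l
  induction l with
  | nil => intro _ cnt res _; rfl
  | cons x l ih =>
    intro hmem cnt res hres
    simp only [List.foldl_cons]
    have hx : (innerJ row n (cnt, res) x) =
        ((innerJ row n (cnt, res) x).1, max res (uCand row n x)) := by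
      refine Prod.ext rfl ?_
      exact innerJ_snd row n (cnt, res) x (hmem x (by simp)) hres
    rw [hx, ih (fun j hj => hmem j (by simp [hj])) _ _
      (le_trans hres (le_max_left _ _))]

lemma stepB_eq (r : List Int) (m j : Nat) (hj : j + 2 < m) (best : Int) (hb : 0 ≤ best) :
    stepB r ((Sf r m (j + 1) : Int), (Sb r m (j + 1) : Int), best) j
      = ((Sf r m j : Int), (Sb r m j : Int), max best (uCand r m j)) := by
  have hSfj : Sf r m j = if valF r j then Sf r m (j + 1) + 1 else 0 := by rw [Sf]; simp [hj]
  have hSbj : Sb r m j = if valB r j then Sb r m (j + 1) + 1 else 0 := by rw [Sb]; simp [hj]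
  have hne1 : ((Sf r m (j + 1) : Int) + 1 != 0) = true := by simp [bne_iff_ne]; omega
  have hne2 : ((Sb r m (j + 1) : Int) + 1 != 0) = true := by simp [bne_iff_ne]; omega
  have hz : ((0 : Int) != 0) = false := by decide
  simp only [stepB, uCand, wF, wB]
  by_cases hf : valF r j = true <;> by_cases hbv : valB r j = true <;>
    by_cases hm : (pvGet r (j + 1) != 0) = true <;>
      simp only [valF, valB] at hf hbv <;>
      simp only [hSfj, hSbj, valF, valB, hf, hbv, hm, Bool.not_eq_true] at * <;>
      (simp [hf, hbv, hm, hne1, hne2, hz, hSfj, hSbj, Prod.ext_iff]) <;> omega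

lemma Sf_top (r : List Int) (m : Nat) : Sf r m (m - 2) = 0 := by
  rw [Sf]; simp only [if_neg (by omega : ¬ m - 2 + 2 < m)]

lemma Sb_top (r : List Int) (m : Nat) : Sb r m (m - 2) = 0 := by
  rw [Sb]; simp only [if_neg (by omega : ¬ m - 2 + 2 < m)]

lemma scanB (r : List Int) (m : Nat) :
    ∀ (j : Nat), j ≤ m - 2 → ∀ (best : Int), 0 ≤ best →
      (List.range j).reverse.foldl (stepB r) ((Sf r m j : Int), (Sb r m j : Int), best)
        = ((Sf r m 0 : Int), (Sb r m 0 : Int),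
           (List.range j).reverse.foldl (fun res i => max res (uCand r m i)) best) := by
  intro j
  induction j with
  | zero => intro _ best _; rfl
  | succ j ih =>
    intro hj best hb
    rw [List.range_succ, List.reverse_append]
    simp only [List.reverse_singleton, List.singleton_append, List.foldl_cons]
    rw [stepB_eq r m j (by omega) best hb]
    exact ih (by omega) _ (le_trans hb (le_max_left _ _))

lemma foldl_maxu_shift (r : List Int) (m : Nat) :
    ∀ (l : List Nat) (b : Int) (x : Nat),
      l.foldl (fun res i => max res (uCand r m i)) (max b (uCand r m x))
        = max (l.foldl (fun res i => max res (uCand r m i)) b) (uCand r m x) := by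
  intro l
  induction l with
  | nil => intro b x; rfl
  | cons y l ih =>
    intro b x
    simp only [List.foldl_cons]
    rw [max_right_comm, ih]

lemma foldl_maxu_reverse (r : List Int) (m : Nat) :
    ∀ (l : List Nat) (b : Int),
      l.reverse.foldl (fun res i => max res (uCand r m i)) b
        = l.foldl (fun res i => max res (uCand r m i)) b := by
  intro l
  induction l with
  | nil => intro b; rfl
  | cons x l ih =>
    intro b
    simp only [List.reverse_cons, List.foldl_append, List.foldl_cons, List.foldl_nil,
      List.foldl_cons]
    rw [ih, ← foldl_maxu_shift]

lemma pvGet_take (l : List Int) (n i : Nat) (hi : i < n) :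
    pvGet (l.take n) i = pvGet l i := by
  simp [pvGet, List.getD, List.getElem?_take, hi]  -- (linted below)

lemma valF_take (row : List Int) (n j : Nat) (hj : j + 2 < n) :
    valF (row.take n) j = valF row j := by
  simp only [valF, pvGet_take row n j (by omega), pvGet_take row n (j + 1) (by omega),
    pvGet_take row n (j + 2) (by omega)]

lemma valB_take (row : List Int) (n j : Nat) (hj : j + 2 < n) :
    valB (row.take n) j = valB row j := by
  simp only [valB, pvGet_take row n j (by omega), pvGet_take row n (j + 1) (by omega),
    pvGet_take row n (j + 2) (by omega)]

lemma Sf_take (row : List Int) (n : Nat) :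
    ∀ (k j : Nat), n - j ≤ k → Sf (row.take n) n j = Sf row n j := by
  intro k
  induction k with
  | zero =>
    intro j hk
    conv_lhs => rw [Sf]
    conv_rhs => rw [Sf]
    rw [if_neg (by omega : ¬ j + 2 < n), if_neg (by omega : ¬ j + 2 < n)]
  | succ k ih =>
    intro j hk
    conv_lhs => rw [Sf]
    conv_rhs => rw [Sf]
    by_cases h : j + 2 < n
    · rw [if_pos h, if_pos h, valF_take row n j h, ih (j + 1) (by omega)]
    · rw [if_neg h, if_neg h]

lemma Sb_take (row : List Int) (n : Nat) :
    ∀ (k j : Nat), n - j ≤ k → Sb (row.take n) n j = Sb row n j := by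
  intro k
  induction k with
  | zero =>
    intro j hk
    conv_lhs => rw [Sb]
    conv_rhs => rw [Sb]
    rw [if_neg (by omega : ¬ j + 2 < n), if_neg (by omega : ¬ j + 2 < n)]
  | succ k ih =>
    intro j hk
    conv_lhs => rw [Sb]
    conv_rhs => rw [Sb]
    by_cases h : j + 2 < n
    · rw [if_pos h, if_pos h, valB_take row n j h, ih (j + 1) (by omega)]
    · rw [if_neg h, if_neg h]

lemma uCand_take (row : List Int) (n j : Nat) (hj : j + 2 < n) :
    uCand (row.take n) n j = uCand row n j := by
  simp only [uCand, wF, wB, valF_take row n j hj, valB_take row n j hj,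
    pvGet_take row n (j + 1) (by omega),
    Sf_take row n n j (by omega), Sb_take row n n j (by omega)]

lemma rowB_eq (row : List Int) (n : Nat) (hn : n ≤ row.length) (best : Int) (hb : 0 ≤ best) :
    ((List.range ((row.take n).length - 2)).reverse.foldl (stepB (row.take n)) (0, 0, best)).2.2
      = rowMax row n best := by
  have hm : (row.take n).length = n := by simp [List.length_take, hn]
  rw [hm]
  have h0 : ((0:Int), (0:Int), best)
      = ((Sf (row.take n) n (n - 2) : Int), (Sb (row.take n) n (n - 2) : Int), best) := by
    rw [Sf_top, Sb_top]; simp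
  rw [h0, scanB (row.take n) n (n - 2) (le_refl _) best hb]
  simp only []
  rw [foldl_maxu_reverse, rowMax]
  apply PySem.List.foldl_congr_mem
  intro acc j hj
  rw [uCand_take row n j (by have := List.mem_range.mp hj; omega)]

lemma le_rowMax (row : List Int) (n : Nat) (res : Int) : res ≤ rowMax row n res :=
  le_foldl_maxu row n _ res

lemma outerA (T : List (List Int)) (n : Nat) :
    ∀ (li : List Nat) (cnt res : Int), 0 ≤ res →
      (li.foldl (fun st i =>
          (List.range (n - 2)).foldl (fun st j => innerJ (pvRow T i) n st j) st) (cnt, res)).2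
        = li.foldl (fun r i => rowMax (pvRow T i) n r) res := by
  intro li
  induction li with
  | nil => intro _ _ _; rfl
  | cons x li ih =>
    intro cnt res hres
    simp only [List.foldl_cons]
    have hrow := rowA_fold (pvRow T x) n (List.range (n - 2))
      (fun j hj => by have := List.mem_range.mp hj; omega) cnt res hres
    have hx : (List.range (n - 2)).foldl (fun st j => innerJ (pvRow T x) n st j) (cnt, res)
        = (((List.range (n - 2)).foldl (fun st j => innerJ (pvRow T x) n st j) (cnt, res)).1,
           rowMax (pvRow T x) n res) := by
      refine Prod.ext rfl ?_
      exact hrow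
    rw [hx, ih _ _ (le_trans hres (le_rowMax _ _ _))]

lemma foldl_range_getD {α β : Type} (f : β → α → β) (d : α) :
    ∀ (l : List α) (b : β),
      (List.range l.length).foldl (fun s i => f s (l.getD i d)) b = l.foldl f b := by
  intro l
  induction l with
  | nil => intro b; rfl
  | cons x l ih =>
    intro b
    rw [List.length_cons, List.range_succ_eq_map, List.foldl_cons, List.foldl_map]
    simpa using ih (f b x)

lemma outerB (n : Nat) :
    ∀ (L : List (List Int)) (b : Int), 0 ≤ b → (∀ row ∈ L, n ≤ row.length) →
      L.foldl (fun best row =>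
          ((List.range ((row.take n).length - 2)).reverse.foldl
            (stepB (row.take n)) (0, 0, best)).2.2) b
        = L.foldl (fun r row => rowMax row n r) b := by
  intro L
  induction L with
  | nil => intro _ _ _; rfl
  | cons row L ih =>
    intro b hb hmem
    simp only [List.foldl_cons]
    rw [rowB_eq row n (hmem row (by simp)) b hb,
      ih _ (le_trans hb (le_rowMax _ _ _)) (fun r hr => hmem r (by simp [hr]))]

lemma foldl_const {α β : Type} : ∀ (l : List α) (b : β), l.foldl (fun b _ => b) b = b := by
  intro l
  induction l with
  | nil => intro b; rfl
  | cons x l ih => intro b; exact ih b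

lemma funcalt_small (n : Nat) (hn : n < 3) :
    ∀ (L : List (List Int)) (b : Int),
      L.foldl (fun best row =>
          ((List.range ((row.take n).length - 2)).reverse.foldl
            (stepB (row.take n)) (0, 0, best)).2.2) b = b := by
  intro L
  induction L with
  | nil => intro b; rfl
  | cons row L ih =>
    intro b
    simp only [List.foldl_cons]
    have hle : (row.take n).length ≤ n := by simp
    have h0 : (row.take n).length - 2 = 0 := by omega
    rw [h0]
    exact ih b

theorem main (T : List (List Int))
    (hpre : T.length < 3 ∨ ∀ row ∈ T, T.length ≤ row.length) :
    func T = func_alt T := by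
  by_cases h3 : T.length < 3
  · have hA : func T = 0 := by
      simp only [func]
      have : T.length - 2 = 0 := by omega
      rw [this]
      simp only [List.range_zero, List.foldl_nil]
      rw [foldl_const]
    have hB : func_alt T = 0 := funcalt_small T.length h3 T 0
    rw [hA, hB]
  · have hrows : ∀ row ∈ T, T.length ≤ row.length := hpre.resolve_left h3
    have hA : func T = T.foldl (fun r row => rowMax row T.length r) 0 := by
      simp only [func]
      rw [outerA T T.length (List.range T.length) 2 0 (le_refl 0)]
      exact foldl_range_getD (fun r row => rowMax row T.length r) [] T 0
    have hB : func_alt T = T.foldl (fun r row => rowMax row T.length r) 0 := by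
      simp only [func_alt]
      exact outerB T.length T 0 (le_refl 0) hrows
    rw [hA, hB]

-- ===== VERDICT (by name: the statement is the Claim_ definition above) =====
theorem func_spec : Claim_equal_func := by
  intro T _ hpre
  exact main T hpre
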